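-- pv_equiv track=rewrite | github.com/JoeDBNS/programming-practice | Tutoring/Joe/fewest-dollar-returns.py | ReturnFewestBillAmounts
-- ===== SOURCE A (Python) =====
-- def ReturnFewestBillAmounts(working_total):
--     bill_types = [100, 50, 20, 10, 5, 1]
--
--     used_bills = {
--         1: 0,
--         5: 0,
--         10: 0,
--         20: 0,
--         50: 0,
--         100: 0
--     }
--
--     while working_total > 0:
--         if working_total >= bill_types[0]:
--             working_total -= bill_types[0]
--             used_bills[bill_types[0]] += 1
--         else:
--             del bill_types[0]
--
--     return used_bills
-- ===== SOURCE B (Python) =====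
-- def ReturnFewestBillAmounts(working_total):
--     used_bills = {1: 0, 5: 0, 10: 0, 20: 0, 50: 0, 100: 0}
--     remaining = working_total if working_total > 0 else 0
--     for bill in (100, 50, 20, 10, 5, 1):
--         used_bills[bill], remaining = divmod(remaining, bill)
--     return used_bills
-- ===== Notes on version B (the rewrite author's own statement) =====
-- stated objective: faster
-- what changed: replaces the subtract-one-bill-per-iteration while loop (O(total) iterations) with one divmod per denomination (6 constant-time steps).
import Mathlib
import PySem

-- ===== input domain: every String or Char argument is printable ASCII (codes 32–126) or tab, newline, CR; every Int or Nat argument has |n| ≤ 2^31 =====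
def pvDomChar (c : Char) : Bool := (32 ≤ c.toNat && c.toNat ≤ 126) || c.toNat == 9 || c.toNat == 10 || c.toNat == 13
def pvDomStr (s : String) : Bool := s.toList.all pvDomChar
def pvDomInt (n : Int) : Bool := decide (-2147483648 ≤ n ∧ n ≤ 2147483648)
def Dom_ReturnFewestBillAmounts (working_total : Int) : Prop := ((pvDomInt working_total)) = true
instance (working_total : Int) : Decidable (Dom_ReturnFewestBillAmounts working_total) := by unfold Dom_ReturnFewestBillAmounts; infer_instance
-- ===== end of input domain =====

-- B replaces A's subtract-one-bill-per-iteration while loop with one divmod per denomination (constant work).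

-- ===== PORT A =====
-- bill_types only ever loses its head, so it is represented by the index i of its
-- current head in the original list [100, 50, 20, 10, 5, 1]; 'del bill_types[0]' is 'i+1'.
def pvBillTypes : List Int := [100, 50, 20, 10, 5, 1]

def pvLoopA (working_total : Int) (i : Nat) (used : PySem.Dict Int Int) : PySem.Dict Int Int :=
  if h : working_total > 0 then
    if hi : i < 6 then
      if hb : working_total ≥ pvBillTypes.getD i 0 then
        pvLoopA (working_total - pvBillTypes.getD i 0) i (used.modify (pvBillTypes.getD i 0) 0 (· + 1))
      else
        pvLoopA working_total (i + 1) used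
    else used  -- Python would raise IndexError here; unreachable since the last bill is 1
  else used
termination_by (working_total.toNat, 6 - i)
decreasing_by
  · have hpos : (1:Int) ≤ pvBillTypes.getD i 0 := by interval_cases i <;> decide
    exact Prod.Lex.left _ _ (by omega)
  · exact Prod.Lex.right _ (by omega)

def ReturnFewestBillAmounts (working_total : Int) : List (Int × Int) :=
  let used_bills : PySem.Dict Int Int :=
    PySem.Dict.ofList [(1, 0), (5, 0), (10, 0), (20, 0), (50, 0), (100, 0)]
  (pvLoopA working_total 0 used_bills).items

-- ===== PORT B =====
def ReturnFewestBillAmounts_alt (working_total : Int) : List (Int × Int) :=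
  let used0 : PySem.Dict Int Int :=
    PySem.Dict.ofList [(1, 0), (5, 0), (10, 0), (20, 0), (50, 0), (100, 0)]
  let remaining0 : Int := if working_total > 0 then working_total else 0
  let st := [(100:Int), 50, 20, 10, 5, 1].foldl
    (fun (st : PySem.Dict Int Int × Int) bill =>
      (st.1.insert bill (PySem.Int.floordiv st.2 bill), PySem.Int.mod st.2 bill))
    (used0, remaining0)
  st.1.items

-- ===== PRECONDITION & SPEC =====
def Spec_ReturnFewestBillAmounts (working_total : Int) (out : List (Int × Int)) : Prop := out = ReturnFewestBillAmounts_alt working_total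
instance (working_total : Int) (out : List (Int × Int)) : Decidable (Spec_ReturnFewestBillAmounts working_total out) := by unfold Spec_ReturnFewestBillAmounts; infer_instance

-- ===== CLAIM (what is proved, stated in full; the proofs are below) =====
def Claim_equal_ReturnFewestBillAmounts : Prop := ∀ (working_total : Int), Dom_ReturnFewestBillAmounts working_total → Spec_ReturnFewestBillAmounts working_total (ReturnFewestBillAmounts working_total)

-- ===== LEMMAS AND PROOFS =====

lemma pv_contains_eq_keys (d : PySem.Dict Int Int) (k : Int) :
    d.contains k = d.keys.any (· == k) := by
  obtain ⟨l⟩ := d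
  simp only [PySem.Dict.contains, PySem.Dict.keys, List.any_map]
  rfl

lemma pv_keys_insert_of_contains (d : PySem.Dict Int Int) (k v : Int)
    (h : d.contains k = true) : (d.insert k v).keys = d.keys := by
  obtain ⟨l⟩ := d
  simp only [PySem.Dict.insert, h, if_true, PySem.Dict.keys, List.map_map]
  apply List.map_congr_left
  intro p _
  by_cases hp : p.1 = k
  · simp [Function.comp, hp]
  · simp [Function.comp, hp]

lemma pv_insert_insert_same (d : PySem.Dict Int Int) (k v w : Int) :
    (d.insert k v).insert k w = d.insert k w := by
  obtain ⟨l⟩ := d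
  by_cases hc : l.any (fun p => p.1 == k) = true
  · have hc2 : (List.map (fun p => if p.1 == k then (k, v) else p) l).any
        (fun p => p.1 == k) = true := by
      rw [List.any_map]
      rw [List.any_eq_true] at hc ⊢
      obtain ⟨p, hp, hpk⟩ := hc
      exact ⟨p, hp, by simp [Function.comp, hpk]⟩
    simp only [PySem.Dict.insert, PySem.Dict.contains, hc, hc2, if_true,
      List.map_map]
    congr 1
    apply List.map_congr_left
    intro p _
    by_cases hp : p.1 = k
    · simp [Function.comp, hp]
    · simp [Function.comp, hp]
  · have hc2 : ((l ++ [(k, v)]).any (fun p => p.1 == k)) = true := by simp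
    simp only [PySem.Dict.insert, PySem.Dict.contains, hc, hc2, if_true,
      Bool.false_eq_true, if_false]
    congr 1
    rw [List.map_append]
    have hl : l.map (fun p => if p.1 == k then (k, w) else p) = l := by
      conv_rhs => rw [← List.map_id l]
      apply List.map_congr_left
      intro p hp
      simp only [Bool.not_eq_true, List.any_eq_false] at hc
      simp [hc p hp]
    rw [hl]
    simp

lemma pv_replace_self (l : List (Int × Int)) (k v : Int)
    (hn : (l.map Prod.fst).Nodup)
    (h : l.find? (fun p => p.1 == k) = some (k, v)) :
    l.map (fun p => if p.1 == k then (k, v) else p) = l := by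
  induction l with
  | nil => simp at h
  | cons a l ih =>
    simp only [List.map_cons, List.nodup_cons] at hn
    by_cases ha : a.1 == k
    · rw [List.find?_cons_of_pos (p := fun q : Int × Int => q.1 == k) ha] at h
      have hav : a = (k, v) := by injection h
      subst hav
      simp only [List.map_cons, ha, if_true]
      have : l.map (fun p => if p.1 == k then (k, v) else p) = l := by
        conv_rhs => rw [← List.map_id l]
        apply List.map_congr_left
        intro p hp
        have : ¬(p.1 == k) := by
          intro hpk
          exact hn.1 (by
            have : p.1 = k := eq_of_beq hpk
            rw [← this] at ha
            exact List.mem_map.mpr ⟨p, hp, by simp [this, eq_of_beq ha]⟩)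
        simp [this]
      rw [this]
    · rw [List.find?_cons_of_neg (p := fun q : Int × Int => q.1 == k) ha] at h
      simp only [List.map_cons, ha]
      rw [ih hn.2 h]
      simp

lemma pv_contains_find? (l : List (Int × Int)) (k : Int)
    (h : l.any (fun p => p.1 == k) = true) :
    ∃ v, l.find? (fun p => p.1 == k) = some (k, v) := by
  induction l with
  | nil => simp at h
  | cons a l ih =>
    by_cases ha : a.1 == k
    · refine ⟨a.2, ?_⟩
      rw [List.find?_cons_of_pos (p := fun q : Int × Int => q.1 == k) ha]
      have h1 : a.1 = k := eq_of_beq ha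
      rw [← h1]
    · simp only [List.any_cons, ha, Bool.false_or] at h
      obtain ⟨v, hv⟩ := ih h
      exact ⟨v, by rw [List.find?_cons_of_neg (p := fun q : Int × Int => q.1 == k) ha]; exact hv⟩

lemma pv_insert_getD_self (d : PySem.Dict Int Int) (k d0 : Int)
    (hn : d.keys.Nodup) (h : d.contains k = true) :
    d.insert k (d.getD k d0) = d := by
  obtain ⟨l⟩ := d
  simp only [PySem.Dict.contains] at h
  obtain ⟨v, hv⟩ := pv_contains_find? l k h
  simp only [PySem.Dict.insert, PySem.Dict.contains, h, if_true,
    PySem.Dict.getD, PySem.Dict.get?, hv, Option.map_some, Option.getD_some]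
  congr 1
  exact pv_replace_self l k v (by simpa [PySem.Dict.keys] using hn) hv

lemma pv_modify_modify (d : PySem.Dict Int Int) (k d0 : Int) (f g : Int → Int) :
    (d.modify k d0 f).modify k d0 g = d.modify k d0 (fun x => g (f x)) := by
  simp only [PySem.Dict.modify, PySem.Dict.getD_insert_self]
  rw [pv_insert_insert_same]

lemma pv_modify_add_zero (d : PySem.Dict Int Int) (k d0 : Int)
    (hn : d.keys.Nodup) (h : d.contains k = true) :
    d.modify k d0 (· + 0) = d := by
  simp only [PySem.Dict.modify, add_zero]
  exact pv_insert_getD_self d k d0 hn h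

def pvUsedKeys : List Int := [1, 5, 10, 20, 50, 100]

lemma pv_keys_modify_stable (d : PySem.Dict Int Int) (k d0 : Int) (f : Int → Int)
    (h : d.contains k = true) : (d.modify k d0 f).keys = d.keys := by
  rw [PySem.Dict.keys_modify]
  exact pv_keys_insert_of_contains d k _ h

lemma pv_contains_of_keys (d : PySem.Dict Int Int) (i : Nat) (hi : i < 6)
    (hk : d.keys = pvUsedKeys) : d.contains (pvBillTypes.getD i 0) = true := by
  rw [pv_contains_eq_keys, hk]
  interval_cases i <;> decide

lemma pv_loop_div (i : Nat) (hi : i < 6) (wt : Int) (d : PySem.Dict Int Int)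
    (hw : 0 ≤ wt) (hk : d.keys = pvUsedKeys) :
    pvLoopA wt i d =
      pvLoopA (wt % pvBillTypes.getD i 0) (i + 1)
        (d.modify (pvBillTypes.getD i 0) 0 (· + wt / pvBillTypes.getD i 0)) := by
  have hc : d.contains (pvBillTypes.getD i 0) = true := pv_contains_of_keys d i hi hk
  have hn : d.keys.Nodup := by rw [hk]; decide
  have hb : (1:Int) ≤ pvBillTypes.getD i 0 := by interval_cases i <;> decide
  set b := pvBillTypes.getD i 0 with hbdef
  by_cases h1 : wt > 0
  · by_cases h2 : wt ≥ b
    · rw [pvLoopA]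
      simp only [h1, hi, dif_pos, ← hbdef, h2, dite_true, dite_eq_ite]
      have hk' : (d.modify b 0 (· + 1)).keys = pvUsedKeys := by
        rw [pv_keys_modify_stable d b 0 _ hc, hk]
      rw [pv_loop_div i hi (wt - b) (d.modify b 0 (· + 1)) (by omega) hk']
      rw [← hbdef, pv_modify_modify]
      have hmod : (wt - b) % b = wt % b := Int.sub_emod_right wt b
      have hdiv : (wt - b) / b = wt / b - 1 := by
        have h := Int.add_mul_ediv_right wt (-1) (show b ≠ 0 by omega)
        have : wt + -1 * b = wt - b := by ring
        rw [this] at h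
        rw [h]; ring
      rw [hmod, hdiv]
      have hf : (fun x : Int => x + 1 + (wt / b - 1)) = (fun x : Int => x + wt / b) := by
        funext x; ring
      rw [hf]
    · rw [pvLoopA]
      simp only [h1, hi, dif_pos, ← hbdef, dite_eq_ite]
      rw [if_neg h2]
      have hmod : wt % b = wt := Int.emod_eq_of_lt hw (by omega)
      have hdiv : wt / b = 0 := Int.ediv_eq_zero_of_lt hw (by omega)
      rw [hmod, hdiv, pv_modify_add_zero d b 0 hn hc]
  · have hw0 : wt = 0 := by omega
    subst hw0
    have hmod : (0:Int) % b = 0 := by simp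
    have hdiv : (0:Int) / b = 0 := by simp
    rw [hmod, hdiv, pv_modify_add_zero d b 0 hn hc]
    conv_lhs => rw [pvLoopA]
    conv_rhs => rw [pvLoopA]
    simp
termination_by wt.toNat
decreasing_by omega


lemma pv_keys_after (d : PySem.Dict Int Int) (b : Int) (f : Int → Int)
    (hb : pvUsedKeys.any (· == b) = true) (hk : d.keys = pvUsedKeys) :
    (d.modify b 0 f).keys = pvUsedKeys := by
  have hc : d.contains b = true := by rw [pv_contains_eq_keys, hk]; exact hb
  rw [pv_keys_modify_stable d b 0 f hc, hk]

lemma pv_step (i : Nat) (b : Int) (hib : pvBillTypes.getD i 0 = b) (hi : i < 6)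
    (wt : Int) (d : PySem.Dict Int Int) (hw : 0 ≤ wt) (hk : d.keys = pvUsedKeys) :
    pvLoopA wt i d = pvLoopA (wt % b) (i + 1) (d.modify b 0 (· + wt / b)) := by
  rw [pv_loop_div i hi wt d hw hk, hib]

-- ===== VERDICT (by name: the statement is the Claim_ definition above) =====
theorem ReturnFewestBillAmounts_spec : Claim_equal_ReturnFewestBillAmounts := by
  intro wt _
  show ReturnFewestBillAmounts wt = ReturnFewestBillAmounts_alt wt
  by_cases hpos : wt > 0
  · rw [ReturnFewestBillAmounts, ReturnFewestBillAmounts_alt]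
    have hk0 : (PySem.Dict.ofList [((1:Int), (0:Int)), (5, 0), (10, 0), (20, 0), (50, 0), (100, 0)]).keys = pvUsedKeys := by decide
    have hw : (0:Int) ≤ wt := by omega
    have hw1 : (0:Int) ≤ wt % 100 := Int.emod_nonneg wt (by norm_num)
    have hw2 : (0:Int) ≤ wt % 100 % 50 := Int.emod_nonneg _ (by norm_num)
    have hw3 : (0:Int) ≤ wt % 100 % 50 % 20 := Int.emod_nonneg _ (by norm_num)
    have hw4 : (0:Int) ≤ wt % 100 % 50 % 20 % 10 := Int.emod_nonneg _ (by norm_num)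
    have hw5 : (0:Int) ≤ wt % 100 % 50 % 20 % 10 % 5 := Int.emod_nonneg _ (by norm_num)
    have hk1 := pv_keys_after _ 100 (· + wt / 100) (by decide) hk0
    have hk2 := pv_keys_after _ 50 (· + wt % 100 / 50) (by decide) hk1
    have hk3 := pv_keys_after _ 20 (· + wt % 100 % 50 / 20) (by decide) hk2
    have hk4 := pv_keys_after _ 10 (· + wt % 100 % 50 % 20 / 10) (by decide) hk3
    have hk5 := pv_keys_after _ 5 (· + wt % 100 % 50 % 20 % 10 / 5) (by decide) hk4
    rw [pv_step 0 100 rfl (by norm_num) wt _ hw hk0]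
    rw [pv_step 1 50 rfl (by norm_num) _ _ hw1 hk1]
    rw [pv_step 2 20 rfl (by norm_num) _ _ hw2 hk2]
    rw [pv_step 3 10 rfl (by norm_num) _ _ hw3 hk3]
    rw [pv_step 4 5 rfl (by norm_num) _ _ hw4 hk4]
    rw [pv_step 5 1 rfl (by norm_num) _ _ hw5 hk5]
    rw [Int.emod_one]
    rw [pvLoopA]
    simp only [lt_irrefl, gt_iff_lt, dite_eq_ite, if_false]
    have e100 : PySem.Int.floordiv wt 100 = wt / 100 := PySem.Int.floordiv_eq_ediv_of_pos (by norm_num)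
    have m100 : PySem.Int.mod wt 100 = wt % 100 := PySem.Int.mod_eq_emod_of_pos (by norm_num)
    have e50 : PySem.Int.floordiv (wt % 100) 50 = wt % 100 / 50 := PySem.Int.floordiv_eq_ediv_of_pos (by norm_num)
    have m50 : PySem.Int.mod (wt % 100) 50 = wt % 100 % 50 := PySem.Int.mod_eq_emod_of_pos (by norm_num)
    have e20 : PySem.Int.floordiv (wt % 100 % 50) 20 = wt % 100 % 50 / 20 := PySem.Int.floordiv_eq_ediv_of_pos (by norm_num)
    have m20 : PySem.Int.mod (wt % 100 % 50) 20 = wt % 100 % 50 % 20 := PySem.Int.mod_eq_emod_of_pos (by norm_num)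
    have e10 : PySem.Int.floordiv (wt % 100 % 50 % 20) 10 = wt % 100 % 50 % 20 / 10 := PySem.Int.floordiv_eq_ediv_of_pos (by norm_num)
    have m10 : PySem.Int.mod (wt % 100 % 50 % 20) 10 = wt % 100 % 50 % 20 % 10 := PySem.Int.mod_eq_emod_of_pos (by norm_num)
    have e5 : PySem.Int.floordiv (wt % 100 % 50 % 20 % 10) 5 = wt % 100 % 50 % 20 % 10 / 5 := PySem.Int.floordiv_eq_ediv_of_pos (by norm_num)
    have m5 : PySem.Int.mod (wt % 100 % 50 % 20 % 10) 5 = wt % 100 % 50 % 20 % 10 % 5 := PySem.Int.mod_eq_emod_of_pos (by norm_num)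
    have e1 : PySem.Int.floordiv (wt % 100 % 50 % 20 % 10 % 5) 1 = wt % 100 % 50 % 20 % 10 % 5 / 1 := PySem.Int.floordiv_eq_ediv_of_pos (by norm_num)
    simp only [List.foldl_cons, List.foldl_nil, if_pos hpos, e100, m100, e50, m50, e20, m20,
      e10, m10, e5, m5, e1]
    simp [PySem.Dict.modify, PySem.Dict.insert, PySem.Dict.getD, PySem.Dict.get?,
      PySem.Dict.contains, PySem.Dict.ofList, PySem.Dict.update, PySem.Dict.empty]
  · rw [ReturnFewestBillAmounts, ReturnFewestBillAmounts_alt]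
    conv_lhs => rw [pvLoopA]
    rw [dif_neg hpos, if_neg hpos]
    decide
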